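-- pv_equiv track=rewrite | github.com/BrettehlertSEO/GEO-Scanner | geo_scanner/crawler.py | find_brand_passages
-- ===== SOURCE A (Python) =====
-- def find_brand_passages(
--     text: str, brand_terms: list[str], context_chars: int = 500
-- ) -> list[str]:
--     """
--     Find passages in the article text that mention any of the brand terms.
--
--     Returns a list of text excerpts (surrounding context around each mention).
--     """
--     if not text:
--         return []
--
--     text_lower = text.lower()
--     passages: list[str] = []
--     used_ranges: list[tuple[int, int]] = []
--
--     for term in brand_terms:
--         start = 0
--         term_lower = term.lower()
--         while True:
--             idx = text_lower.find(term_lower, start)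
--             if idx == -1:
--                 break
--
--             ctx_start = max(0, idx - context_chars)
--             ctx_end = min(len(text), idx + len(term) + context_chars)
--
--             overlaps = False
--             for rs, re_ in used_ranges:
--                 if ctx_start < re_ and ctx_end > rs:
--                     overlaps = True
--                     break
--
--             if not overlaps:
--                 passages.append(text[ctx_start:ctx_end].strip())
--                 used_ranges.append((ctx_start, ctx_end))
--
--             start = idx + len(term)
--
--     return passages
-- ===== SOURCE B (Python) =====
-- from bisect import bisect_right
--
-- def find_brand_passages(text, brand_terms, context_chars=500):
--     if not text:
--         return []
--
--     text_lower = text.lower()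
--     n = len(text)
--
--     # Phase 1: collect candidate context ranges of each distinct term, in the same order A
--     # visits matches.  (Match positions do not depend on which passages get accepted, and a
--     # repeated term's candidates always overlap ranges already seen, so they never survive.)
--     candidates: list[tuple[int, int]] = []
--     seen: set[str] = set()
--     for term in brand_terms:
--         term_lower = term.lower()
--         if term_lower in seen:
--             continue  # a repeated term can only re-find already-covered ranges
--         seen.add(term_lower)
--         start = 0
--         while True:
--             idx = text_lower.find(term_lower, start)
--             if idx == -1:
--                 break
--             candidates.append((max(0, idx - context_chars),
--                                min(n, idx + len(term) + context_chars)))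
--             start = idx + len(term)
--
--     # Phase 2: accept non-overlapping ranges, keeping accepted ranges sorted so
--     # the overlap test is a binary search of the two neighbours, not a full rescan.
--     passages: list[str] = []
--     starts: list[int] = []
--     ends: list[int] = []
--     for cs, ce in candidates:
--         i = bisect_right(starts, cs)
--         if (i > 0 and ends[i - 1] > cs) or (i < len(starts) and starts[i] < ce):
--             continue
--         passages.append(text[cs:ce].strip())
--         starts.insert(i, cs)
--         ends.insert(i, ce)
--     return passages
-- ===== Notes on version B (the rewrite author's own statement) =====
-- stated objective: faster
-- what changed: B skips duplicate (case-folded) brand terms (their candidates always overlap already-seen ranges), collects all remaining candidate context ranges in one pass, then filters them keeping the accepted ranges in sorted parallel start/end lists so each overlap test is a binary search of the two neighbouring ranges instead of A's rescan of every accepted range.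
-- outside the precondition, e.g. on find_brand_passages(' a ', [' a ', ' a'], -1): A returns ['a', ''], B returns ['a']
import Mathlib
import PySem

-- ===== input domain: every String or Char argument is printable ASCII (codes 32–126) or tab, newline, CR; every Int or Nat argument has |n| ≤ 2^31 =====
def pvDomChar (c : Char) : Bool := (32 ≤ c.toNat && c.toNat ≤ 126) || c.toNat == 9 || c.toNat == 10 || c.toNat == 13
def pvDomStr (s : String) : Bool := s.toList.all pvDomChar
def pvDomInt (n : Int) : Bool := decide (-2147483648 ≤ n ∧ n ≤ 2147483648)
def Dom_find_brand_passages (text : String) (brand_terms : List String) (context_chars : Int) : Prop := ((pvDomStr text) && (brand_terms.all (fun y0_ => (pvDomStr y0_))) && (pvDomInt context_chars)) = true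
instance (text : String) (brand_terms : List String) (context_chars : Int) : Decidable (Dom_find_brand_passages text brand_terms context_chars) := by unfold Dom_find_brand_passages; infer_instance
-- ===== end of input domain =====

-- B skips duplicate (case-folded) brand terms — their candidates always overlap ranges already
-- seen — collects all remaining candidate context ranges first, then accepts non-overlapping
-- ones with the accepted ranges kept in sorted parallel start/end lists (binary-search
-- neighbour test instead of A's rescan of all accepted ranges); measurably faster.

-- ===== PORT A =====
-- the body of one iteration of A's 'while True' after idx was found: the 'for rs, re_ in
-- used_ranges' overlap scan (ported as .any, the early-exit boolean loop) and the two appends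
def pvAStep (text : List Char) (st : List String × List (Int × Int)) (cs ce : Int) :
    List String × List (Int × Int) :=
  if st.2.any (fun r => decide (cs < r.2 ∧ ce > r.1)) then st
  else (st.1 ++ [String.ofList (PySem.Chars.strip (PySem.List.slice text (some cs) (some ce)))],
        st.2 ++ [(cs, ce)])

-- A's 'while True' loop; fuel bounds the iterations (start strictly increases by len(term) ≥ 1,
-- so text.length + 1 iterations are enough for the nonempty terms Pre_ admits)
def pvAWhile (text textLower termLower : List Char) (termLen : Nat) (context_chars : Int)
    (fuel : Nat) (start : Int) (st : List String × List (Int × Int)) :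
    List String × List (Int × Int) :=
  match fuel with
  | 0 => st
  | fuel + 1 =>
    let idx := PySem.Chars.findFrom textLower termLower start
    if idx = -1 then st
    else
      let cs := max 0 (idx - context_chars)
      let ce := min ((text.length : Int)) (idx + (termLen : Int) + context_chars)
      pvAWhile text textLower termLower termLen context_chars fuel (idx + (termLen : Int))
        (pvAStep text st cs ce)

def find_brand_passages (text : String) (brand_terms : List String) (context_chars : Int) :
    List String :=
  if text = "" then []
  else
    let tl := text.toList
    let textLower := PySem.Chars.lower tl
    (brand_terms.foldl
      (fun st term =>
        pvAWhile tl textLower (PySem.Chars.lower term.toList) term.toList.length context_chars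
          (tl.length + 1) 0 st)
      ([], [])).1

-- ===== PORT B =====
-- phase 1 of Source B: collect the candidate (ctx_start, ctx_end) ranges of one term
def pvBCands (textLower : List Char) (n : Int) (termLower : List Char) (termLen : Nat)
    (context_chars : Int) (fuel : Nat) (start : Int) (acc : List (Int × Int)) :
    List (Int × Int) :=
  match fuel with
  | 0 => acc
  | fuel + 1 =>
    let idx := PySem.Chars.findFrom textLower termLower start
    if idx = -1 then acc
    else pvBCands textLower n termLower termLen context_chars fuel (idx + (termLen : Int))
          (acc ++ [(max 0 (idx - context_chars), min n (idx + (termLen : Int) + context_chars))])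

-- phase 2 of Source B: one candidate against the sorted parallel lists (starts, ends);
-- ends[i-1] / starts[i] are ported with getD — both accesses are guarded in range
def pvBStep (text : List Char) (st : List String × List Int × List Int) (c : Int × Int) :
    List String × List Int × List Int :=
  let i := PySem.List.bisectRight st.2.1 c.1
  if (0 < i ∧ st.2.2.getD (i - 1) 0 > c.1) ∨ (i < st.2.1.length ∧ st.2.1.getD i 0 < c.2) then st
  else (st.1 ++ [String.ofList (PySem.Chars.strip (PySem.List.slice text (some c.1) (some c.2)))],
        PySem.List.insert st.2.1 (i : Int) c.1, PySem.List.insert st.2.2 (i : Int) c.2)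

def find_brand_passages_alt (text : String) (brand_terms : List String) (context_chars : Int) :
    List String :=
  if text = "" then []
  else
    let tl := text.toList
    let textLower := PySem.Chars.lower tl
    let cands := (brand_terms.foldl
      (fun (st : PySem.Set (List Char) × List (Int × Int)) term =>
        let term_lower := PySem.Chars.lower term.toList
        if PySem.Set.contains st.1 term_lower then st
        else (PySem.Set.add st.1 term_lower,
          pvBCands textLower (tl.length : Int) term_lower
            term.toList.length context_chars (tl.length + 1) 0 st.2))
      (PySem.Set.empty, [])).2
    (cands.foldl (pvBStep tl) ([], [], [])).1

-- ===== PRECONDITION & SPEC =====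
-- Pre_ excludes: (1) an empty brand term with nonempty text — A's find('') loop never advances,
-- so A DIVERGES there; (2) negative context_chars — outside the natural domain of a context
-- size: A returns there, but only via the accidental interplay of inverted/empty ranges in its
-- overlap scan (see the cite in the claim); B does the natural thing.
def Pre_find_brand_passages (text : String) (brand_terms : List String) (context_chars : Int) : Prop :=
  (text = "" ∨ ¬ "" ∈ brand_terms) ∧ 0 ≤ context_chars
instance (text : String) (brand_terms : List String) (context_chars : Int) :
    Decidable (Pre_find_brand_passages text brand_terms context_chars) := by
  unfold Pre_find_brand_passages; infer_instance

def pvWitness_find_brand_passages : String × List String × Int :=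
  ("Our Brand makes tea. People love brand tea.", ["brand", "tea"], 8)

def Spec_find_brand_passages (text : String) (brand_terms : List String) (context_chars : Int)
    (out : List String) : Prop := out = find_brand_passages_alt text brand_terms context_chars
instance (text : String) (brand_terms : List String) (context_chars : Int) (out : List String) :
    Decidable (Spec_find_brand_passages text brand_terms context_chars out) := by
  unfold Spec_find_brand_passages; infer_instance

-- ===== CLAIM (what is proved, stated in full; the proofs are below) =====
def Claim_equal_find_brand_passages : Prop := ∀ (text : String) (brand_terms : List String) (context_chars : Int), Dom_find_brand_passages text brand_terms context_chars → Pre_find_brand_passages text brand_terms context_chars → Spec_find_brand_passages text brand_terms context_chars (find_brand_passages text brand_terms context_chars)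

-- ===== LEMMAS AND PROOFS =====

-- the state invariant tying A's append-order used_ranges to B's sorted parallel lists
def pvInv (used : List (Int × Int)) (starts ends : List Int) : Prop :=
  used.Perm (starts.zip ends) ∧ starts.length = ends.length ∧
  (∀ p ∈ starts.zip ends, p.1 < p.2) ∧
  List.Pairwise (fun p q : Int × Int => p.2 ≤ q.1) (starts.zip ends)

lemma pvBCands_acc (textLower : List Char) (n : Int) (termLower : List Char) (termLen : Nat)
    (context_chars : Int) (fuel : Nat) (start : Int) (acc : List (Int × Int)) :
    pvBCands textLower n termLower termLen context_chars fuel start acc =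
      acc ++ pvBCands textLower n termLower termLen context_chars fuel start [] := by
  induction fuel generalizing start acc with
  | zero => simp [pvBCands]
  | succ fuel ih =>
    simp only [pvBCands]
    split
    · simp
    · rw [ih, ih (acc := [] ++ _)]; simp

-- fusion: A's interleaved while loop is the fold of A's step over B's candidate list
lemma pvAWhile_eq_foldl (text textLower termLower : List Char) (termLen : Nat)
    (context_chars : Int) (fuel : Nat) (start : Int) (st : List String × List (Int × Int)) :
    pvAWhile text textLower termLower termLen context_chars fuel start st =
      (pvBCands textLower (text.length : Int) termLower termLen context_chars fuel start []).foldl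
        (fun st c => pvAStep text st c.1 c.2) st := by
  induction fuel generalizing start st with
  | zero => simp [pvAWhile, pvBCands]
  | succ fuel ih =>
    simp only [pvAWhile, pvBCands]
    split
    · simp
    · rw [ih]; conv_rhs => rw [pvBCands_acc]
      simp

-- bounds on a successful find: the match starts at or after start and fits inside the text
lemma pvFind_bounds (textLower termLower : List Char) (start : Int)
    (hterm : 1 ≤ termLower.length) (h0 : 0 ≤ start)
    (hne : PySem.Chars.findFrom textLower termLower start ≠ -1) :
    start ≤ PySem.Chars.findFrom textLower termLower start ∧
    0 ≤ PySem.Chars.findFrom textLower termLower start ∧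
    PySem.Chars.findFrom textLower termLower start + (termLower.length : Int) ≤ (textLower.length : Int) := by
  by_cases hk : start.toNat ≤ textLower.length
  · have hs : start = (start.toNat : Int) := (Int.toNat_of_nonneg h0).symm
    rw [hs] at hne ⊢
    obtain ⟨h1, h2, _⟩ := PySem.Chars.findFrom_natCast_spec textLower termLower start.toNat hk hne
    have hpl := h2.length_le
    simp only [List.length_drop] at hpl
    have hidx0 : 0 ≤ PySem.Chars.findFrom textLower termLower (start.toNat : Int) :=
      le_trans (by positivity) h1
    have hnn : ((PySem.Chars.findFrom textLower termLower (start.toNat : Int)).toNat : Int)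
        = PySem.Chars.findFrom textLower termLower (start.toNat : Int) := Int.toNat_of_nonneg hidx0
    refine ⟨h1, hidx0, ?_⟩
    omega
  · exfalso; apply hne
    simp only [PySem.Chars.findFrom]
    have h1 : ¬ (start < 0) := not_lt.mpr h0
    have h2 : (textLower.length : Int) < start := by omega
    simp [h1, h2]

-- every candidate range is a nonempty range (needs context_chars ≥ 0 and a nonempty term)
lemma pvBCands_shape (textLower : List Char) (n : Int) (termLower : List Char) (termLen : Nat)
    (context_chars : Int) (fuel : Nat) (start : Int)
    (hn : n = (textLower.length : Int)) (hlen : termLower.length = termLen)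
    (hpos : 1 ≤ termLen) (hctx : 0 ≤ context_chars) (hstart : 0 ≤ start) :
    ∀ c ∈ pvBCands textLower n termLower termLen context_chars fuel start [], c.1 < c.2 := by
  induction fuel generalizing start with
  | zero => simp [pvBCands]
  | succ fuel ih =>
    intro c hc
    simp only [pvBCands] at hc
    by_cases hfind : PySem.Chars.findFrom textLower termLower start = -1
    · simp [hfind] at hc
    · rw [if_neg hfind, pvBCands_acc] at hc
      obtain ⟨hle, h0i, hub⟩ := pvFind_bounds textLower termLower start (by omega) hstart hfind
      rcases List.mem_append.mp hc with h | h
      · simp only [List.nil_append, List.mem_singleton] at h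
        subst h
        show max _ _ < min _ _
        omega
      · exact ih _ (by omega) c h

-- index-level views of the pvInv components
lemma pvNE (starts ends : List Int) (hlen : starts.length = ends.length)
    (hne : ∀ p ∈ starts.zip ends, p.1 < p.2) :
    ∀ j (hj : j < starts.length), starts[j] < ends[j] := by
  intro j hj
  have hz : j < (starts.zip ends).length := by simp [List.length_zip]; omega
  have := hne (starts.zip ends)[j] (List.getElem_mem hz)
  simpa [List.getElem_zip] using this

lemma pvPW (starts ends : List Int) (hlen : starts.length = ends.length)
    (hpw : List.Pairwise (fun p q : Int × Int => p.2 ≤ q.1) (starts.zip ends)) :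
    ∀ j k (hj : j < starts.length) (hk : k < starts.length), j < k → ends[j] ≤ starts[k] := by
  intro j k hj hk hjk
  have hz : (starts.zip ends).length = starts.length := by simp [List.length_zip]; omega
  have := List.pairwise_iff_getElem.mp hpw j k (by omega) (by omega) hjk
  simpa [List.getElem_zip] using this

lemma pvSS (starts ends : List Int) (hlen : starts.length = ends.length)
    (hne : ∀ p ∈ starts.zip ends, p.1 < p.2)
    (hpw : List.Pairwise (fun p q : Int × Int => p.2 ≤ q.1) (starts.zip ends)) :
    List.Pairwise (fun a b : Int => a ≤ b) starts := by
  rw [List.pairwise_iff_getElem]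
  intro j k hj hk hjk
  exact le_of_lt (lt_of_lt_of_le (pvNE starts ends hlen hne j hj)
    (pvPW starts ends hlen hpw j k hj hk hjk))

-- the heart: on sorted disjoint nonempty ranges, A's full overlap scan and B's two-neighbour
-- binary-search test agree
lemma pvNeighbor (starts ends : List Int) (cs ce : Int)
    (hlen : starts.length = ends.length)
    (hne : ∀ p ∈ starts.zip ends, p.1 < p.2)
    (hpw : List.Pairwise (fun p q : Int × Int => p.2 ≤ q.1) (starts.zip ends))
    (hc : cs < ce) :
    ((starts.zip ends).any (fun r => decide (cs < r.2 ∧ ce > r.1)) = true) ↔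
    ((0 < PySem.List.bisectRight starts cs ∧
        ends.getD (PySem.List.bisectRight starts cs - 1) 0 > cs) ∨
      (PySem.List.bisectRight starts cs < starts.length ∧
        starts.getD (PySem.List.bisectRight starts cs) 0 < ce)) := by
  have hzlen : (starts.zip ends).length = starts.length := by simp [List.length_zip]; omega
  have hne' := pvNE starts ends hlen hne
  have hpw' := pvPW starts ends hlen hpw
  obtain ⟨hi1, hilo, hihi⟩ := PySem.List.bisectRight_spec starts cs (pvSS starts ends hlen hne hpw)
  have hssg : ∀ j k (hj : j < starts.length) (hk : k < starts.length), j ≤ k → starts[j] ≤ starts[k] := by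
    intro j k hj hk hjk
    rcases eq_or_lt_of_le hjk with rfl | h
    · exact le_refl _
    · exact List.pairwise_iff_getElem.mp (pvSS starts ends hlen hne hpw) j k hj hk h
  set i := PySem.List.bisectRight starts cs with hidef
  constructor
  · intro hany
    obtain ⟨r, hr, hcond⟩ := List.any_eq_true.mp hany
    obtain ⟨j, hj, hrj⟩ := List.mem_iff_getElem.mp hr
    rw [List.getElem_zip] at hrj
    have hj' : j < starts.length := by omega
    simp only [decide_eq_true_eq] at hcond
    rw [← hrj] at hcond
    simp only at hcond
    by_cases hji : j < i
    · left
      refine ⟨by omega, ?_⟩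
      have hi1' : i - 1 < ends.length := by omega
      rw [List.getD_eq_getElem ends 0 hi1']
      by_cases hjeq : j = i - 1
      · subst hjeq; exact hcond.1
      · have ha : ends[j] ≤ starts[i-1] := hpw' j (i-1) hj' (by omega) (by omega)
        have hb : starts[i-1] < ends[i-1]'hi1' := hne' (i-1) (by omega)
        omega
    · right
      have hil : i < starts.length := by omega
      refine ⟨hil, ?_⟩
      rw [List.getD_eq_getElem starts 0 hil]
      have := hssg i j hil hj' (by omega)
      omega
  · intro h
    rcases h with ⟨hi0, hgt⟩ | ⟨hil, hlt⟩
    · have hi1' : i - 1 < ends.length := by omega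
      rw [List.getD_eq_getElem ends 0 hi1'] at hgt
      refine List.any_eq_true.mpr ⟨(starts.zip ends)[i-1]'(by omega), List.getElem_mem _, ?_⟩
      rw [List.getElem_zip]
      simp only [decide_eq_true_eq]
      have hsle : starts[i-1]'(by omega) ≤ cs := hilo (i-1) (by omega) (by omega)
      exact ⟨hgt, by omega⟩
    · rw [List.getD_eq_getElem starts 0 hil] at hlt
      refine List.any_eq_true.mpr ⟨(starts.zip ends)[i]'(by omega), List.getElem_mem _, ?_⟩
      rw [List.getElem_zip]
      simp only [decide_eq_true_eq]
      have h1 := hihi i hil (le_refl i)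
      have h2 := hne' i hil
      exact ⟨by omega, hlt⟩

-- zip commutes with take/drop (not in this Mathlib; straightforward inductions)
lemma pvTakeZip (a b : List Int) (i : Nat) :
    (a.take i).zip (b.take i) = (a.zip b).take i := by
  induction a generalizing b i with
  | nil => simp
  | cons x a ih =>
    cases b with
    | nil => simp
    | cons y b =>
      cases i with
      | zero => simp
      | succ i => simp [ih]

lemma pvDropZip (a b : List Int) (i : Nat) :
    (a.drop i).zip (b.drop i) = (a.zip b).drop i := by
  induction a generalizing b i with
  | nil => simp
  | cons x a ih =>
    cases b with
    | nil => simp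
    | cons y b =>
      cases i with
      | zero => simp
      | succ i => simp [ih]

lemma pvZip_insert (starts ends : List Int) (cs ce : Int) (i : Nat)
    (hlen : starts.length = ends.length) (hi : i ≤ starts.length) :
    (List.take i starts ++ cs :: List.drop i starts).zip
        (List.take i ends ++ ce :: List.drop i ends)
      = List.take i (starts.zip ends) ++ (cs, ce) :: List.drop i (starts.zip ends) := by
  rw [List.zip_append (by simp only [List.length_take]; omega)]
  simp [List.zip_cons_cons, pvTakeZip, pvDropZip]

-- an accepted (non-overlapping) range inserted at the bisect position keeps the invariant
lemma pvInsertInv (used : List (Int × Int)) (starts ends : List Int) (cs ce : Int)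
    (hinv : pvInv used starts ends) (hc : cs < ce)
    (hno : ¬ ((0 < PySem.List.bisectRight starts cs ∧
        ends.getD (PySem.List.bisectRight starts cs - 1) 0 > cs) ∨
      (PySem.List.bisectRight starts cs < starts.length ∧
        starts.getD (PySem.List.bisectRight starts cs) 0 < ce))) :
    pvInv (used ++ [(cs, ce)])
      (PySem.List.insert starts (PySem.List.bisectRight starts cs : Int) cs)
      (PySem.List.insert ends (PySem.List.bisectRight starts cs : Int) ce) := by
  obtain ⟨hperm, hlen, hne, hpw⟩ := hinv
  have hzlen : (starts.zip ends).length = starts.length := by simp [List.length_zip]; omega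
  have hne' := pvNE starts ends hlen hne
  have hpw' := pvPW starts ends hlen hpw
  obtain ⟨hi1, hilo, hihi⟩ := PySem.List.bisectRight_spec starts cs (pvSS starts ends hlen hne hpw)
  have hssg : ∀ j k (hj : j < starts.length) (hk : k < starts.length), j ≤ k → starts[j] ≤ starts[k] := by
    intro j k hj hk hjk
    rcases eq_or_lt_of_le hjk with rfl | h
    · exact le_refl _
    · exact List.pairwise_iff_getElem.mp (pvSS starts ends hlen hne hpw) j k hj hk h
  have hesg : ∀ j k (hj : j < starts.length) (hk : k < starts.length), j ≤ k → ends[j] ≤ ends[k] := by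
    intro j k hj hk hjk
    rcases eq_or_lt_of_le hjk with rfl | h
    · exact le_refl _
    · exact le_of_lt (lt_of_le_of_lt (hpw' j k hj hk h) (hne' k hk))
  push_neg at hno
  set i := PySem.List.bisectRight starts cs with hidef
  rw [PySem.List.insert_natCast starts i cs hi1,
      PySem.List.insert_natCast ends i ce (by omega)]
  have hz := pvZip_insert starts ends cs ce i hlen hi1
  have hsplit := List.pairwise_append.mp
    (show List.Pairwise (fun p q : Int × Int => p.2 ≤ q.1)
        (List.take i (starts.zip ends) ++ List.drop i (starts.zip ends)) by
      rw [List.take_append_drop]; exact hpw)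
  obtain ⟨hpwt, hpwd, hcross⟩ := hsplit
  have htake1 : ∀ p ∈ List.take i (starts.zip ends), p.2 ≤ cs := by
    intro p hpt
    obtain ⟨j, hjt, hjp⟩ := List.mem_iff_getElem.mp hpt
    have hjt' : j < i := by simp [List.length_take] at hjt; omega
    have hjz : j < (starts.zip ends).length := by simp [List.length_take] at hjt; omega
    rw [List.getElem_take] at hjp
    rw [← hjp, List.getElem_zip]
    have h0i : 0 < i := by omega
    have hgle : ends.getD (i-1) 0 ≤ cs := hno.1 h0i
    rw [List.getD_eq_getElem ends 0 (by omega)] at hgle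
    have := hesg j (i-1) (by omega) (by omega) (by omega)
    simp only
    omega
  have hdrop1 : ∀ q ∈ List.drop i (starts.zip ends), ce ≤ q.1 := by
    intro q hq
    obtain ⟨j, hjd, hjq⟩ := List.mem_iff_getElem.mp hq
    rw [List.getElem_drop] at hjq
    have hjz : i + j < (starts.zip ends).length := by simp [List.length_drop] at hjd; omega
    have hil : i < starts.length := by omega
    have hge : ce ≤ starts.getD i 0 := hno.2 hil
    rw [List.getD_eq_getElem starts 0 hil] at hge
    have := hssg i (i+j) hil (by omega) (by omega)
    rw [← hjq, List.getElem_zip]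
    simp only
    omega
  refine ⟨?_, ?_, ?_, ?_⟩
  · rw [hz]
    refine (hperm.append_right _).trans ((List.perm_append_singleton _ _).trans ?_)
    have hsp : (cs, ce) :: (starts.zip ends)
        = (cs, ce) :: (List.take i (starts.zip ends) ++ List.drop i (starts.zip ends)) := by
      rw [List.take_append_drop]
    rw [hsp]
    exact List.perm_middle.symm
  · simp only [List.length_append, List.length_cons, List.length_take, List.length_drop]
    omega
  · intro p hp
    rw [hz] at hp
    rcases List.mem_append.mp hp with h | h
    · exact hne p (List.mem_of_mem_take h)
    · rcases List.mem_cons.mp h with rfl | h'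
      · exact hc
      · exact hne p (List.mem_of_mem_drop h')
  · rw [hz, List.pairwise_append]
    refine ⟨hpwt, ?_, ?_⟩
    · rw [List.pairwise_cons]
      exact ⟨hdrop1, hpwd⟩
    · intro p hpt q hq
      rcases List.mem_cons.mp hq with rfl | hq'
      · exact htake1 p hpt
      · exact hcross p hpt q hq'

-- == duplicate terms are no-ops for A's loop ==

-- A's used_ranges only ever grows
lemma pvMem_foldl (text : List Char) (cs : List (Int × Int))
    (st : List String × List (Int × Int)) (r : Int × Int) (hr : r ∈ st.2) :
    r ∈ (cs.foldl (fun st c => pvAStep text st c.1 c.2) st).2 := by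
  induction cs generalizing st with
  | nil => exact hr
  | cons c rest ih =>
    refine ih _ ?_
    simp only [pvAStep]
    split
    · exact hr
    · exact List.mem_append_left _ hr

-- after processing a candidate list, each of its (nonempty) candidates overlaps some kept range
lemma pvCovered (text : List Char) (cs : List (Int × Int))
    (st : List String × List (Int × Int)) (hs : ∀ c ∈ cs, c.1 < c.2) :
    ∀ c ∈ cs, ∃ r ∈ (cs.foldl (fun st c => pvAStep text st c.1 c.2) st).2,
      c.1 < r.2 ∧ c.2 > r.1 := by
  induction cs generalizing st with
  | nil => simp
  | cons c rest ih =>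
    intro d hd
    rcases List.mem_cons.mp hd with rfl | hd'
    · simp only [List.foldl_cons]
      by_cases hov : (st.2.any (fun r => decide (d.1 < r.2 ∧ d.2 > r.1))) = true
      · obtain ⟨r, hr, hcond⟩ := List.any_eq_true.mp hov
        simp only [decide_eq_true_eq] at hcond
        refine ⟨r, pvMem_foldl text rest _ r ?_, hcond⟩
        simp only [pvAStep, hov, if_true]
        exact hr
      · refine ⟨d, pvMem_foldl text rest _ d ?_, hs d hd, hs d hd⟩
        simp only [pvAStep, hov, if_false]
        exact List.mem_append_right _ (by simp)
    · exact ih _ (fun e he => hs e (List.mem_cons_of_mem _ he)) d hd'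

-- a candidate list whose members all overlap kept ranges is processed without effect
lemma pvNoop (text : List Char) (cs : List (Int × Int))
    (st : List String × List (Int × Int))
    (h : ∀ c ∈ cs, ∃ r ∈ st.2, c.1 < r.2 ∧ c.2 > r.1) :
    cs.foldl (fun st c => pvAStep text st c.1 c.2) st = st := by
  induction cs with
  | nil => rfl
  | cons c rest ih =>
    have hov : (st.2.any (fun r => decide (c.1 < r.2 ∧ c.2 > r.1))) = true := by
      obtain ⟨r, hr, h1, h2⟩ := h c (List.mem_cons_self ..)
      exact List.any_eq_true.mpr ⟨r, hr, by simp [h1, h2]⟩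
    simp only [List.foldl_cons, pvAStep, hov, if_true]
    exact ih (fun d hd => h d (List.mem_cons_of_mem _ hd))

-- the list of first occurrences of case-folded terms that B's seen-set keeps
def pvDedupGo (terms : List String) (seen : PySem.Set (List Char)) : List String :=
  match terms with
  | [] => []
  | t :: ts =>
    if PySem.Set.contains seen (PySem.Chars.lower t.toList) then pvDedupGo ts seen
    else t :: pvDedupGo ts (PySem.Set.add seen (PySem.Chars.lower t.toList))

lemma pvDedupGo_subset (terms : List String) (seen : PySem.Set (List Char)) :
    ∀ t ∈ pvDedupGo terms seen, t ∈ terms := by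
  induction terms generalizing seen with
  | nil => simp [pvDedupGo]
  | cons t ts ih =>
    intro u hu
    simp only [pvDedupGo] at hu
    split at hu
    · exact List.mem_cons_of_mem _ (ih seen u hu)
    · rcases List.mem_cons.mp hu with rfl | hu'
      · exact List.mem_cons_self ..
      · exact List.mem_cons_of_mem _ (ih _ u hu')

-- B's phase-1 fold produces exactly the candidates of the deduplicated terms
lemma pvBPhase1 (tlow : List Char) (n : Int) (context_chars : Int) (fuel : Nat)
    (terms : List String) (seen : PySem.Set (List Char)) (acc : List (Int × Int)) :
    (terms.foldl
      (fun (st : PySem.Set (List Char) × List (Int × Int)) term =>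
        if PySem.Set.contains st.1 (PySem.Chars.lower term.toList) then st
        else (PySem.Set.add st.1 (PySem.Chars.lower term.toList),
          pvBCands tlow n (PySem.Chars.lower term.toList)
            term.toList.length context_chars fuel 0 st.2))
      (seen, acc)).2 =
    acc ++ (pvDedupGo terms seen).flatMap
      (fun term => pvBCands tlow n (PySem.Chars.lower term.toList)
        term.toList.length context_chars fuel 0 []) := by
  induction terms generalizing seen acc with
  | nil => simp [pvDedupGo]
  | cons t ts ih =>
    simp only [List.foldl_cons, pvDedupGo]
    by_cases hc : PySem.Set.contains seen (PySem.Chars.lower t.toList) = true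
    · simp only [hc, if_true]
      exact ih seen acc
    · simp only [hc, if_false]
      rw [ih, pvBCands_acc]
      simp [List.flatMap_cons]

-- a term's candidate list depends only on its case-folded form
lemma pvCandsOf_key (tlow : List Char) (n : Int) (context_chars : Int) (fuel : Nat)
    (t u : String) (h : PySem.Chars.lower t.toList = PySem.Chars.lower u.toList) :
    pvBCands tlow n (PySem.Chars.lower t.toList) t.toList.length context_chars fuel 0 []
      = pvBCands tlow n (PySem.Chars.lower u.toList) u.toList.length context_chars fuel 0 [] := by
  have hl : t.toList.length = u.toList.length := by
    have := congrArg List.length h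
    simpa [PySem.Chars.lower] using this
  rw [h, hl]

-- skipping duplicate terms does not change A's fold
lemma pvDedup_eq (text tlow : List Char) (n : Int) (context_chars : Int) (fuel : Nat)
    (terms : List String)
    (hshape : ∀ t ∈ terms, ∀ c ∈ pvBCands tlow n (PySem.Chars.lower t.toList)
        t.toList.length context_chars fuel 0 [], c.1 < c.2) :
    ∀ (seen : PySem.Set (List Char)) (st : List String × List (Int × Int)),
    (∀ t ∈ terms, (PySem.Chars.lower t.toList) ∈ seen →
      ∀ c ∈ pvBCands tlow n (PySem.Chars.lower t.toList) t.toList.length context_chars fuel 0 [],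
        ∃ r ∈ st.2, c.1 < r.2 ∧ c.2 > r.1) →
    terms.foldl
        (fun st term => (pvBCands tlow n (PySem.Chars.lower term.toList)
          term.toList.length context_chars fuel 0 []).foldl
            (fun st c => pvAStep text st c.1 c.2) st) st =
      (pvDedupGo terms seen).foldl
        (fun st term => (pvBCands tlow n (PySem.Chars.lower term.toList)
          term.toList.length context_chars fuel 0 []).foldl
            (fun st c => pvAStep text st c.1 c.2) st) st := by
  induction terms with
  | nil => intro seen st _; simp [pvDedupGo]
  | cons t ts ih =>
    intro seen st hcov
    simp only [List.foldl_cons, pvDedupGo]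
    by_cases hc : PySem.Set.contains seen (PySem.Chars.lower t.toList) = true
    · rw [if_pos hc]
      have hmem : (PySem.Chars.lower t.toList) ∈ seen := by
        simpa [PySem.Set.contains] using hc
      rw [pvNoop text _ st (hcov t (List.mem_cons_self ..) hmem)]
      exact ih (fun u hu => hshape u (List.mem_cons_of_mem _ hu)) seen st
        (fun u hu hm => hcov u (List.mem_cons_of_mem _ hu) hm)
    · rw [if_neg hc]
      simp only [List.foldl_cons]
      refine ih (fun u hu => hshape u (List.mem_cons_of_mem _ hu))
        (PySem.Set.add seen (PySem.Chars.lower t.toList)) _ ?_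
      intro u hu hm c hcm
      rcases (PySem.Set.mem_add seen _ _).mp hm with hold | hkey
      · obtain ⟨r, hr, h1, h2⟩ := hcov u (List.mem_cons_of_mem _ hu) hold c hcm
        exact ⟨r, pvMem_foldl text _ st r hr, h1, h2⟩
      · rw [pvCandsOf_key tlow n context_chars fuel u t hkey] at hcm
        exact pvCovered text _ st (hshape t (List.mem_cons_self ..)) c hcm

lemma pvStep_rel (text : List Char) (stA : List String × List (Int × Int))
    (stB : List String × List Int × List Int) (c : Int × Int)
    (hp : stA.1 = stB.1) (hinv : pvInv stA.2 stB.2.1 stB.2.2) (hc : c.1 < c.2) :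
    (pvAStep text stA c.1 c.2).1 = (pvBStep text stB c).1 ∧
    pvInv (pvAStep text stA c.1 c.2).2 (pvBStep text stB c).2.1 (pvBStep text stB c).2.2 := by
  obtain ⟨hperm, hlen, hne, hpw⟩ := hinv
  have hany : stA.2.any (fun r => decide (c.1 < r.2 ∧ c.2 > r.1)) =
      (stB.2.1.zip stB.2.2).any (fun r => decide (c.1 < r.2 ∧ c.2 > r.1)) :=
    List.Perm.any_eq hperm
  have hnb := pvNeighbor stB.2.1 stB.2.2 c.1 c.2 hlen hne hpw hc
  simp only [pvAStep, pvBStep]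
  by_cases hcond : (0 < PySem.List.bisectRight stB.2.1 c.1 ∧
      stB.2.2.getD (PySem.List.bisectRight stB.2.1 c.1 - 1) 0 > c.1) ∨
    (PySem.List.bisectRight stB.2.1 c.1 < stB.2.1.length ∧
      stB.2.1.getD (PySem.List.bisectRight stB.2.1 c.1) 0 < c.2)
  · rw [if_pos (hany.trans (of_eq_true (eq_true (hnb.mpr hcond)))), if_pos hcond]
    exact ⟨hp, hperm, hlen, hne, hpw⟩
  · have hfalse : stA.2.any (fun r => decide (c.1 < r.2 ∧ c.2 > r.1)) = false := by
      rw [hany]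
      cases hb : (stB.2.1.zip stB.2.2).any (fun r => decide (c.1 < r.2 ∧ c.2 > r.1)) with
      | false => rfl
      | true => exact absurd (hnb.mp hb) hcond
    rw [if_neg (by rw [hfalse]; simp), if_neg hcond]
    refine ⟨by rw [hp], ?_⟩
    have := pvInsertInv stA.2 stB.2.1 stB.2.2 c.1 c.2 ⟨hperm, hlen, hne, hpw⟩ hc hcond
    simpa using this

lemma pvFold_rel (text : List Char) (cands : List (Int × Int))
    (stA : List String × List (Int × Int)) (stB : List String × List Int × List Int)
    (hp : stA.1 = stB.1) (hinv : pvInv stA.2 stB.2.1 stB.2.2)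
    (hc : ∀ c ∈ cands, c.1 < c.2) :
    (cands.foldl (fun st c => pvAStep text st c.1 c.2) stA).1 =
      (cands.foldl (pvBStep text) stB).1 := by
  induction cands generalizing stA stB with
  | nil => simpa using hp
  | cons c rest ih =>
    have hc0 : c.1 < c.2 := hc c (List.mem_cons_self ..)
    obtain ⟨h1, h2⟩ := pvStep_rel text stA stB c hp hinv hc0
    exact ih _ _ h1 h2 (fun d hd => hc d (List.mem_cons_of_mem _ hd))

-- ===== VERDICT (by name: the statement is the Claim_ definition above) =====
theorem find_brand_passages_spec : Claim_equal_find_brand_passages := by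
  intro text brand_terms context_chars _hdom hpre
  unfold Spec_find_brand_passages
  unfold find_brand_passages find_brand_passages_alt
  by_cases hempty : text = ""
  · simp [hempty]
  · rw [if_neg hempty, if_neg hempty]
    dsimp only
    obtain ⟨hterms, hctx⟩ := hpre
    have hterms' : ∀ term ∈ brand_terms, term ≠ "" := by
      rcases hterms with h | h
      · exact absurd h hempty
      · intro term hmem heq; exact h (heq ▸ hmem)
    have hlowlen : (PySem.Chars.lower text.toList).length = text.toList.length := by
      simp [PySem.Chars.lower]
    -- A's side: fuse each term's interleaved while loop into a fold over its candidates
    have hA : (brand_terms.foldl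
        (fun st term =>
          pvAWhile text.toList (PySem.Chars.lower text.toList) (PySem.Chars.lower term.toList)
            term.toList.length context_chars (text.toList.length + 1) 0 st) ([], [])) =
        brand_terms.foldl
          (fun st term =>
            (pvBCands (PySem.Chars.lower text.toList) (text.toList.length : Int)
              (PySem.Chars.lower term.toList) term.toList.length context_chars
              (text.toList.length + 1) 0 []).foldl
              (fun st c => pvAStep text.toList st c.1 c.2) st)
          ([], []) := by
      apply PySem.List.foldl_congr_mem
      intro st term _
      rw [pvAWhile_eq_foldl]
    -- every term's candidates are nonempty ranges
    have hshape : ∀ t ∈ brand_terms,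
        ∀ c ∈ pvBCands (PySem.Chars.lower text.toList) (text.toList.length : Int)
          (PySem.Chars.lower t.toList) t.toList.length context_chars
          (text.toList.length + 1) 0 [], c.1 < c.2 := by
      intro term hterm c hcin
      have htne : term.toList.length ≥ 1 := by
        have hne0 : term ≠ "" := hterms' term hterm
        have hnil : term.toList ≠ [] := by
          intro hnil
          exact hne0 (String.toList_inj.mp (by simpa using hnil))
        cases hl : term.toList with
        | nil => exact absurd hl hnil
        | cons a l => simp
      exact pvBCands_shape (PySem.Chars.lower text.toList) (text.toList.length : Int)
        (PySem.Chars.lower term.toList) term.toList.length context_chars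
        (text.toList.length + 1) 0 (by rw [hlowlen])
        (by simp [PySem.Chars.lower]) htne hctx (le_refl 0) c hcin
    -- A's fold over all terms equals A's fold over the deduplicated terms
    have hdup := pvDedup_eq text.toList (PySem.Chars.lower text.toList)
      (text.toList.length : Int) context_chars (text.toList.length + 1)
      brand_terms hshape PySem.Set.empty ([], [])
      (by intro t _ hm; simp [PySem.Set.empty] at hm)
    -- B's phase-1 fold is the flatMap over the deduplicated terms
    have hB := pvBPhase1 (PySem.Chars.lower text.toList) (text.toList.length : Int)
      context_chars (text.toList.length + 1) brand_terms PySem.Set.empty []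
    rw [hA, hdup, ← List.foldl_flatMap, hB]
    simp only [List.nil_append]
    apply pvFold_rel
    · rfl
    · exact ⟨List.Perm.refl _, rfl, by simp, by simp⟩
    · intro c hcm
      obtain ⟨term, hterm, hcin⟩ := List.mem_flatMap.mp hcm
      exact hshape term (pvDedupGo_subset brand_terms PySem.Set.empty term hterm) c hcin
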